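-- pv_equiv track=rewrite | github.com/stephanienmorton/Study-Buddies | VSB/util.py | convert_bytearray_to_boolarray
-- ===== SOURCE A (Python) =====
-- def convert_bytearray_to_boolarray(bytearr):
--     """
--     Note that the returned array is LSB first.  The byte array is assumed to be stored in little endian.
--     """
--     arr = [False for _ in range(8*len(bytearr))]
--     for i in range(len(bytearr)):
--         mask = 1
--         for j in range(8):
--             arr[8*i + j] = (bytearr[i] & mask) > 0
--             mask <<= 1
--
--     return arr
-- ===== SOURCE B (Python) =====
-- def convert_bytearray_to_boolarray(bytearr):
--     """
--     Note that the returned array is LSB first.  The byte array is assumed to be stored in little endian.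
--     """
--     return [c == '1' for b in bytearr for c in format(b % 256, '08b')[::-1]]
-- ===== Notes on version B (the rewrite author's own statement) =====
-- stated objective: idiomatic
-- what changed: Replaces the preallocated all-False array filled by nested mask-and-shift index assignments with a single nested comprehension that formats each byte (b % 256) as an 8-bit binary string, reverses it to LSB-first and reads each character as a bool.
import Mathlib
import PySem

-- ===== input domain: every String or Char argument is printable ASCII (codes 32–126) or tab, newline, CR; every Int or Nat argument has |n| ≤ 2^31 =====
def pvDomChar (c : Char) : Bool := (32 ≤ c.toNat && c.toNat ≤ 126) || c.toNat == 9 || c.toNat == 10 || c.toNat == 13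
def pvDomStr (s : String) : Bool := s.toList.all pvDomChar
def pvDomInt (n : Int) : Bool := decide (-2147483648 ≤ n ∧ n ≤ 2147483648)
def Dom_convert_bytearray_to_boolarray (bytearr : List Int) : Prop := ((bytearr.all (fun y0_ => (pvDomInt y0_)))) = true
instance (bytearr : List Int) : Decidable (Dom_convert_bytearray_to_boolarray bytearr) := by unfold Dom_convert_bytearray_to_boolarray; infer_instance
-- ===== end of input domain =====

-- B replaces A's preallocated array and nested mask-and-shift index assignments with one nested
-- comprehension over each byte's reversed 8-bit binary-format string (more idiomatic, same cost).

-- ===== PORT A =====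
def convert_bytearray_to_boolarray (bytearr : List Int) : List Bool :=
  -- arr = [False for _ in range(8*len(bytearr))]
  let arr := List.replicate (8 * bytearr.length) false
  -- for i in range(len(bytearr)): mask = 1; for j in range(8): arr[8*i+j] = (bytearr[i] & mask) > 0; mask <<= 1
  (List.range bytearr.length).foldl
    (fun arr i =>
      ((List.range 8).foldl
        (fun (st : List Bool × Int) j =>
          (st.1.set (8 * i + j) (decide (0 < PySem.Int.band (PySem.List.pyGetD bytearr (i : Int) 0) st.2)),
           st.2 <<< 1))
        (arr, 1)).1)
    arr

-- ===== PORT B =====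
-- format(r, '08b') for 0 ≤ r < 256: the 8 binary digits of r, MSB first (exact on that range)
def pvFormat08b (r : Int) : List Char :=
  (List.range 8).map (fun k => if PySem.Int.mod (r >>> ((7 - k : Nat))) 2 = 1 then '1' else '0')

-- [c == '1' for b in bytearr for c in format(b % 256, '08b')[::-1]]
def convert_bytearray_to_boolarray_alt (bytearr : List Int) : List Bool :=
  bytearr.flatMap (fun b =>
    ((pvFormat08b (PySem.Int.mod b 256)).reverse).map (fun c => decide (c = '1')))

-- ===== PRECONDITION & SPEC =====
def Spec_convert_bytearray_to_boolarray (bytearr : List Int) (out : List Bool) : Prop := out = convert_bytearray_to_boolarray_alt bytearr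
instance (bytearr : List Int) (out : List Bool) : Decidable (Spec_convert_bytearray_to_boolarray bytearr out) := by unfold Spec_convert_bytearray_to_boolarray; infer_instance

-- ===== CLAIM (what is proved, stated in full; the proofs are below) =====
def Claim_equal_convert_bytearray_to_boolarray : Prop := ∀ (bytearr : List Int), Dom_convert_bytearray_to_boolarray bytearr → Spec_convert_bytearray_to_boolarray bytearr (convert_bytearray_to_boolarray bytearr)

-- ===== LEMMAS AND PROOFS =====

-- B's per-byte block of 8 booleans, LSB first
def pvBitsB (b : Int) : List Bool :=
  ((pvFormat08b (PySem.Int.mod b 256)).reverse).map (fun c => decide (c = '1'))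

lemma pv_alt_eq_flatMap (bytearr : List Int) :
    convert_bytearray_to_boolarray_alt bytearr = bytearr.flatMap pvBitsB := rfl

-- bit m (m < 8) of any Python int b equals the matching digit of format(b % 256, '08b')
lemma pv_bit (b : Int) (m : Nat) (hm : m < 8) :
    decide (0 < PySem.Int.band b (2^m)) = decide (PySem.Int.mod ((PySem.Int.mod b 256) >>> m) 2 = 1) := by
  have hmod : PySem.Int.mod b 256 = b % 256 := PySem.Int.mod_eq_emod_of_pos (by norm_num)
  have hmod2 : ∀ x : Int, PySem.Int.mod x 2 = x % 2 := fun x => PySem.Int.mod_eq_emod_of_pos (by norm_num)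
  have h2 : ((2:Int)^m) = ((2^m : Nat) : Int) := by push_cast; ring
  rw [hmod, hmod2, Int.shiftRight_eq_div_pow, decide_eq_decide]
  unfold PySem.Int.band
  by_cases hb : 0 ≤ b
  · rw [if_pos hb, if_pos (by positivity), h2, Int.toNat_natCast, Nat.and_two_pow,
      Nat.testBit_eq_decide_div_mod_eq]
    by_cases h : b.toNat / 2^m % 2 = 1 <;> simp only [h, decide_true, decide_false,
      Bool.toNat_true, Bool.toNat_false, one_mul, zero_mul] <;>
      interval_cases m <;> omega
  · rw [if_neg hb, if_pos (by positivity), h2, Int.toNat_natCast, Nat.and_comm, Nat.and_two_pow,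
      Nat.testBit_eq_decide_div_mod_eq]
    by_cases h : (-b-1).toNat / 2^m % 2 = 1 <;> simp only [h, decide_true, decide_false,
      Bool.toNat_true, Bool.toNat_false, one_mul, zero_mul] <;>
      interval_cases m <;> omega

-- digit m of the reversed format string, as a plain bool, with the mask written as a numeral
lemma pv_digit (b M : Int) (m : Nat) (hm : m < 8) (hM : (2:Int)^m = M) :
    decide ((if PySem.Int.mod ((PySem.Int.mod b 256) >>> m) 2 = 1 then '1' else '0') = '1')
      = decide (0 < PySem.Int.band b M) := by
  rw [← hM, pv_bit b m hm]
  by_cases hc : PySem.Int.mod ((PySem.Int.mod b 256) >>> m) 2 = 1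
  · rw [if_pos hc, hc]
    rfl
  · rw [if_neg hc]
    simpa using hc

lemma pvBitsB_explicit (b : Int) :
    pvBitsB b =
      [decide (0 < PySem.Int.band b 1), decide (0 < PySem.Int.band b 2),
       decide (0 < PySem.Int.band b 4), decide (0 < PySem.Int.band b 8),
       decide (0 < PySem.Int.band b 16), decide (0 < PySem.Int.band b 32),
       decide (0 < PySem.Int.band b 64), decide (0 < PySem.Int.band b 128)] := by
  have h8 : List.range 8 = [0,1,2,3,4,5,6,7] := rfl
  simp only [pvBitsB, pvFormat08b, h8, List.map_cons, List.map_nil, List.reverse_cons,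
    List.reverse_nil, List.nil_append, List.cons_append, List.cons.injEq, and_true]
  exact ⟨pv_digit b 1 0 (by norm_num) (by norm_num), pv_digit b 2 1 (by norm_num) (by norm_num),
    pv_digit b 4 2 (by norm_num) (by norm_num), pv_digit b 8 3 (by norm_num) (by norm_num),
    pv_digit b 16 4 (by norm_num) (by norm_num), pv_digit b 32 5 (by norm_num) (by norm_num),
    pv_digit b 64 6 (by norm_num) (by norm_num), pv_digit b 128 7 (by norm_num) (by norm_num)⟩

lemma pvBitsB_length (b : Int) : (pvBitsB b).length = 8 := by
  rw [pvBitsB_explicit]; rfl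

-- eight successive writes into the fresh slots just after a prefix
lemma pv_sets (xs rest : List Bool) (v0 v1 v2 v3 v4 v5 v6 v7 : Bool) :
    ((((((((xs ++ (false :: false :: false :: false :: false :: false :: false :: false :: rest)).set (xs.length + 0) v0).set (xs.length + 1) v1).set (xs.length + 2) v2).set (xs.length + 3) v3).set (xs.length + 4) v4).set (xs.length + 5) v5).set (xs.length + 6) v6).set (xs.length + 7) v7
    = xs ++ (v0 :: v1 :: v2 :: v3 :: v4 :: v5 :: v6 :: v7 :: rest) := by
  induction xs with
  | nil => rfl
  | cons x xs ih =>
    simp only [List.length_cons, List.cons_append,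
      show ∀ n j : Nat, n + 1 + j = (n + j) + 1 from fun n j => by omega,
      List.set_cons_succ]
    exact congrArg (x :: ·) ih

-- the inner 8-step mask loop overwrites exactly the 8 fresh slots with B's per-byte block
lemma pv_inner (b : Int) (xs rest : List Bool) :
    ((List.range 8).foldl
      (fun (st : List Bool × Int) j =>
        (st.1.set (xs.length + j) (decide (0 < PySem.Int.band b st.2)), st.2 <<< 1))
      (xs ++ (false :: false :: false :: false :: false :: false :: false :: false :: rest), 1)).1
    = xs ++ (pvBitsB b ++ rest) := by
  have h8 : List.range 8 = [0,1,2,3,4,5,6,7] := rfl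
  rw [h8, pvBitsB_explicit]
  simp only [List.foldl]
  exact pv_sets xs rest _ _ _ _ _ _ _ _

-- the outer loop, after its first n iterations: the first n byte-blocks are written, the tail is untouched
lemma pv_outer (bytearr : List Int) (n : Nat) (hn : n ≤ bytearr.length) :
    (List.range n).foldl
      (fun arr i =>
        ((List.range 8).foldl
          (fun (st : List Bool × Int) j =>
            (st.1.set (8 * i + j) (decide (0 < PySem.Int.band (PySem.List.pyGetD bytearr (i : Int) 0) st.2)),
             st.2 <<< 1))
          (arr, 1)).1)
      (List.replicate (8 * bytearr.length) false)
    = (bytearr.take n).flatMap pvBitsB ++ List.replicate (8 * (bytearr.length - n)) false := by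
  induction n with
  | zero => simp
  | succ n ih =>
    have hn' : n ≤ bytearr.length := Nat.le_of_succ_le hn
    have hlt : n < bytearr.length := hn
    have hflen : ∀ l : List Int, (l.flatMap pvBitsB).length = 8 * l.length := by
      intro l
      induction l with
      | nil => simp
      | cons y ys ihy => simp [pvBitsB_length, ihy]; omega
    have hxs : ((bytearr.take n).flatMap pvBitsB).length = 8 * n := by
      rw [hflen, List.length_take_of_le hn']
    have hrep : List.replicate (8 * (bytearr.length - n)) false
        = (false :: false :: false :: false :: false :: false :: false :: false ::
            List.replicate (8 * (bytearr.length - (n+1))) false : List Bool) := by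
      have h88 : 8 * (bytearr.length - n) = 8 + 8 * (bytearr.length - (n+1)) := by omega
      rw [h88, List.replicate_add]; rfl
    have hget : PySem.List.pyGetD bytearr (n : Int) 0 = bytearr[n] := by
      rw [PySem.List.pyGetD_natCast]
      exact List.getD_eq_getElem bytearr 0 hlt
    rw [show List.range (n+1) = List.range n ++ [n] from List.range_succ,
      List.foldl_append, ih hn']
    simp only [List.foldl_cons, List.foldl_nil, hget, hrep]
    rw [show (8:Nat) * n = ((bytearr.take n).flatMap pvBitsB).length from hxs.symm]
    rw [pv_inner]
    rw [List.take_add_one, List.getElem?_eq_getElem hlt]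
    simp only [Option.toList_some, List.flatMap_append, List.flatMap_cons, List.flatMap_nil,
      List.append_nil, List.append_assoc]

-- ===== VERDICT (by name: the statement is the Claim_ definition above) =====
theorem convert_bytearray_to_boolarray_spec : Claim_equal_convert_bytearray_to_boolarray := by
  intro bytearr _
  show convert_bytearray_to_boolarray bytearr = convert_bytearray_to_boolarray_alt bytearr
  rw [pv_alt_eq_flatMap]
  have h := pv_outer bytearr bytearr.length le_rfl
  simp only [List.take_length, Nat.sub_self, Nat.mul_zero, List.replicate_zero,
    List.append_nil] at h
  exact h
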